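-- pv_equiv track=rewrite | github.com/direct-phonology/jdsw | scripts/lib/components.py | split_headwords
-- ===== SOURCE A (Python) =====
-- from typing import Any, Callable, Dict, Iterable, List
--
-- def split_at_indices(text: str, indices: List[int]) -> List[str]:
--     """Split a string at the given indices."""
--     return [
--         part
--         for part in (text[i:j] for i, j in zip([0] + indices, indices + [None]))  # type: ignore
--         if part
--     ]
--
-- def split_headwords(text: str, headword: str) -> List[str]:
--     """Split a string using any characters from the headword."""
--     indices = [i for i, char in enumerate(text) if char in headword]
--     ranges = []
--     for j, i in enumerate(indices):
--         if j == 0: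
--             ranges.append([i, i + 1])
--         elif indices[j - 1] == i - 1:
--             ranges[-1][1] += 1
--         else:
--             ranges.append([i, i + 1])
--     range_indices = [i for r in ranges for i in r]
--     return split_at_indices(text, sorted(list(set(range_indices))))
-- ===== SOURCE B (Python) =====
-- def split_headwords(text, headword):
--     """Split a string using any characters from the headword."""
--     parts = []
--     last_key = None
--     for ch in text:
--         key = ch in headword
--         if parts and key == last_key:
--             parts[-1].append(ch)
--         else:
--             parts.append([ch])
--         last_key = key
--     return [''.join(p) for p in parts]
-- ===== Notes on version B (the rewrite author's own statement) =====
-- stated objective: faster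
-- what changed: Replaces the index-list / range-merging / set-dedup-sort / slice-at-indices pipeline with a single left-to-right pass that accumulates maximal runs of headword / non-headword characters directly.
import Mathlib
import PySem

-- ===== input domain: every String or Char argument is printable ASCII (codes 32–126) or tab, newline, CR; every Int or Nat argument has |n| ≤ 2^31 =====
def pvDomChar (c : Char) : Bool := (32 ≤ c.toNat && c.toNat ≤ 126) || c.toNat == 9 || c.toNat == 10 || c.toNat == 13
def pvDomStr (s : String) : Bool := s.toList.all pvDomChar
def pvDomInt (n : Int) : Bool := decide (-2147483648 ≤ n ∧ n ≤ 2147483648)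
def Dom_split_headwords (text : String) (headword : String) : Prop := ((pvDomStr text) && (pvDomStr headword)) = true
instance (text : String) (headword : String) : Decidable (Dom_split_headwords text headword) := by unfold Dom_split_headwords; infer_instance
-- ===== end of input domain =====

-- B replaces A's index-list / range-merge / set-dedup-sort / slice pipeline by one direct pass
-- accumulating maximal runs of headword / non-headword characters (objective: a single-pass alternative).

-- ===== PORT A =====

-- `c in headword` for a single character c (Python substring test on a 1-char string; exact).
def inHw (headword : String) (c : Char) : Bool := PySem.Chars.isIn [c] headword.toList

def split_at_indices (text : String) (indices : List Int) : List String :=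
  ((((0 :: indices).zip (indices.map some ++ [(none : Option Int)])).map
      (fun ij => PySem.List.slice text.toList (some ij.1) ij.2)).filter
    (fun part => !part.isEmpty)).map String.ofList

-- [i for i, char in enumerate(text) if char in headword]
def idxOf (headword : String) (cs : List Char) : List Int :=
  ((PySem.List.enumerate cs 0).filter (fun ic => inHw headword ic.2)).map (·.1)

-- the body of 'for j, i in enumerate(indices)' (a Python 2-list [a, b] is a pair (a, b))
def brStep (indices : List Int) (ranges : List (Int × Int)) (ji : Int × Int) : List (Int × Int) :=
  if ji.1 = 0 then ranges ++ [(ji.2, ji.2 + 1)]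
  else if PySem.List.pyGet? indices (ji.1 - 1) = some (ji.2 - 1) then
    ranges.dropLast ++ (match ranges.getLast? with
      | some r => [(r.1, r.2 + 1)]
      | none => [])
  else ranges ++ [(ji.2, ji.2 + 1)]

def buildRanges (indices : List Int) : List (Int × Int) :=
  (PySem.List.enumerate indices 0).foldl (brStep indices) []

def split_headwords (text : String) (headword : String) : List String :=
  let indices := idxOf headword text.toList
  let ranges := buildRanges indices
  let range_indices := ranges.flatMap (fun r => [r.1, r.2])
  split_at_indices text
    (PySem.List.sorted (PySem.Set.ofList range_indices) (fun x => x) false)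

-- ===== PORT B =====

-- loop body: key = ch in headword; extend parts[-1] when 'parts and key == last_key', else a new part
def sbStep (headword : String) (st : List (List Char) × Option Bool) (ch : Char) :
    List (List Char) × Option Bool :=
  let key := inHw headword ch
  if st.1 ≠ [] ∧ st.2 = some key then
    (st.1.dropLast ++ [(st.1.getLast?.getD []) ++ [ch]], some key)
  else (st.1 ++ [[ch]], some key)

def split_headwords_alt (text : String) (headword : String) : List String :=
  ((text.toList.foldl (sbStep headword) ([], none)).1).map String.ofList

-- ===== PRECONDITION & SPEC =====
def Spec_split_headwords (text : String) (headword : String) (out : List String) : Prop := out = split_headwords_alt text headword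
instance (text : String) (headword : String) (out : List String) : Decidable (Spec_split_headwords text headword out) := by unfold Spec_split_headwords; infer_instance

-- ===== CLAIM (what is proved, stated in full; the proofs are below) =====
def Claim_equal_split_headwords : Prop := ∀ (text : String) (headword : String), Dom_split_headwords text headword → Spec_split_headwords text headword (split_headwords text headword)

-- ===== LEMMAS AND PROOFS =====

-- run decomposition invariants: every part nonempty and key-constant, adjacent parts alternate keys
def WFRuns (p : Char → Bool) (gs : List (List Char)) : Prop :=
  (∀ g ∈ gs, g ≠ [] ∧ ∀ c ∈ g, p c = p g.headI) ∧
  List.IsChain (fun g h => p g.headI ≠ p h.headI) gs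

-- the [start, end) ranges of the headword runs, by absolute position
def rangesOf (p : Char → Bool) (pos : Nat) : List (List Char) → List (Int × Int)
  | [] => []
  | g :: t =>
      (if p g.headI then [((pos : Int), ((pos + g.length : Nat) : Int))] else []) ++
      rangesOf p (pos + g.length) t

def flatR (rs : List (Int × Int)) : List Int := rs.flatMap (fun r => [r.1, r.2])

lemma idxOf_append (hw : String) (cs : List Char) (c : Char) :
    idxOf hw (cs ++ [c]) = idxOf hw cs ++ (if inHw hw c then [(cs.length : Int)] else []) := by
  unfold idxOf
  rw [PySem.List.enumerate_append, List.filter_append, List.map_append]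
  congr 1
  simp only [PySem.List.enumerate_cons, PySem.List.enumerate_nil]
  cases h : inHw hw c <;> simp [h]

lemma rangesOf_append (p : Char → Bool) (gs1 : List (List Char)) : ∀ (pos : Nat) (gs2 : List (List Char)),
    rangesOf p pos (gs1 ++ gs2) = rangesOf p pos gs1 ++ rangesOf p (pos + gs1.flatten.length) gs2 := by
  induction gs1 with
  | nil => intro pos gs2; simp [rangesOf]
  | cons g t ih =>
      intro pos gs2
      simp only [List.cons_append, rangesOf, ih, List.flatten_cons, List.length_append,
        List.append_assoc, Nat.add_assoc]

lemma brStep_congr (idxs : List Int) (e : Int) :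
    ∀ (acc : List (Int × Int)) (x : Int × Int), x ∈ PySem.List.enumerate idxs 0 →
      brStep (idxs ++ [e]) acc x = brStep idxs acc x := by
  intro acc x hx
  rcases (PySem.List.mem_enumerate_iff _ _ _).1 hx with ⟨k, hk, rfl⟩
  unfold brStep
  by_cases h0 : ((0 : Int) + (k : Int)) = 0
  · simp [h0]
  · rw [if_neg h0, if_neg h0]
    have hk1 : (0 : Int) + (k : Int) - 1 = ((k - 1 : Nat) : Int) := by omega
    rw [hk1, PySem.List.pyGet?_natCast, PySem.List.pyGet?_natCast,
        List.getElem?_append_left (by omega)]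

lemma buildRanges_snoc (idxs : List Int) (e : Int) :
    buildRanges (idxs ++ [e]) =
      if idxs = [] then [(e, e + 1)]
      else if idxs.getLast? = some (e - 1) then
        (buildRanges idxs).dropLast ++ (match (buildRanges idxs).getLast? with
          | some r => [(r.1, r.2 + 1)]
          | none => [])
      else buildRanges idxs ++ [(e, e + 1)] := by
  unfold buildRanges
  rw [PySem.List.enumerate_append, List.foldl_append]
  have hcongr : List.foldl (brStep (idxs ++ [e])) [] (PySem.List.enumerate idxs 0) =
      List.foldl (brStep idxs) [] (PySem.List.enumerate idxs 0) := by
    apply PySem.List.foldl_congr_mem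
    exact brStep_congr idxs e
  rw [hcongr]
  simp only [PySem.List.enumerate_cons, PySem.List.enumerate_nil, List.foldl_cons, List.foldl_nil]
  by_cases h : idxs = []
  · subst h
    simp [brStep]
  · have hpos : 0 < idxs.length := List.length_pos_of_ne_nil h
    rw [if_neg h]
    unfold brStep
    have h0 : ¬ ((0 : Int) + ((idxs.length : Nat) : Int) = 0) := by
      simp only [zero_add]
      exact_mod_cast Nat.pos_iff_ne_zero.mp hpos
    rw [if_neg h0]
    have h1 : (0 : Int) + ((idxs.length : Nat) : Int) - 1 = ((idxs.length - 1 : Nat) : Int) := by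
      omega
    rw [h1, PySem.List.pyGet?_natCast, List.getElem?_append_left (by omega),
        ← List.getLast?_eq_getElem?]

lemma master (hw : String) (cs : List Char) :
    (cs.foldl (sbStep hw) ([], none)).2 = cs.getLast?.map (inHw hw) ∧
    (cs.foldl (sbStep hw) ([], none)).1.flatten = cs ∧
    WFRuns (inHw hw) (cs.foldl (sbStep hw) ([], none)).1 ∧
    (∀ m ∈ idxOf hw cs, 0 ≤ m ∧ m < (cs.length : Int)) ∧
    ((cs.getLast? = none → idxOf hw cs = []) ∧
     (∀ c0, cs.getLast? = some c0 → inHw hw c0 = true →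
        (idxOf hw cs).getLast? = some ((cs.length : Int) - 1)) ∧
     (∀ c0, cs.getLast? = some c0 → inHw hw c0 = false →
        ∀ m ∈ idxOf hw cs, m < (cs.length : Int) - 1)) ∧
    buildRanges (idxOf hw cs) = rangesOf (inHw hw) 0 (cs.foldl (sbStep hw) ([], none)).1 := by
  induction cs using List.reverseRecOn with
  | nil =>
      refine ⟨rfl, rfl, ⟨by simp, by simp⟩, by simp [idxOf, PySem.List.enumerate_nil],
        ⟨fun _ => by simp [idxOf, PySem.List.enumerate_nil], ?_, ?_⟩, rfl⟩
      · intro c0 h; simp at h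
      · intro c0 h; simp at h
  | append_singleton cs c ih =>
      obtain ⟨h1, h2, h3, h4, h5, h6⟩ := ih
      have hfold : ∀ (init : List (List Char) × Option Bool),
          (cs ++ [c]).foldl (sbStep hw) init = sbStep hw (cs.foldl (sbStep hw) init) c := by
        intro init; rw [List.foldl_append]; rfl
      have hL : (cs ++ [c]).length = cs.length + 1 := by simp
      rw [hfold, idxOf_append, List.getLast?_concat, hL]
      set st := cs.foldl (sbStep hw) (([], none) : List (List Char) × Option Bool) with hst
      -- index bounds and last-index characterisation are independent of the branch taken
      have hidx4 : ∀ m ∈ idxOf hw cs ++ (if inHw hw c then [(cs.length : Int)] else []),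
          0 ≤ m ∧ m < ((cs.length + 1 : Nat) : Int) := by
        intro m hm
        rcases List.mem_append.1 hm with hm1 | hm2
        · have hb := h4 m hm1
          push_cast
          omega
        · by_cases hpc : inHw hw c = true
          · simp only [hpc, if_true, List.mem_singleton] at hm2
            subst hm2
            push_cast
            omega
          · have hpc' : inHw hw c = false := by simpa using hpc
            simp [hpc'] at hm2
      have hidx5 :
          (some c = none → idxOf hw cs ++ (if inHw hw c then [(cs.length : Int)] else []) = []) ∧
          (∀ c0, some c = some c0 → inHw hw c0 = true →
            (idxOf hw cs ++ (if inHw hw c then [(cs.length : Int)] else [])).getLast? =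
              some (((cs.length + 1 : Nat) : Int) - 1)) ∧
          (∀ c0, some c = some c0 → inHw hw c0 = false →
            ∀ m ∈ idxOf hw cs ++ (if inHw hw c then [(cs.length : Int)] else []),
              m < ((cs.length + 1 : Nat) : Int) - 1) := by
        refine ⟨fun h => by simp at h, ?_, ?_⟩
        · intro c0 hc0 hp
          have hcc : c0 = c := by simpa using hc0.symm
          subst hcc
          rw [if_pos hp, List.getLast?_concat]
          congr 1
          push_cast
          omega
        · intro c0 hc0 hp
          have hcc : c0 = c := by simpa using hc0.symm
          subst hcc
          rw [hp]
          simp only [Bool.false_eq_true, if_false, List.append_nil]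
          intro m hm
          have hb := h4 m hm
          push_cast
          omega
      by_cases hcond : st.1 ≠ [] ∧ st.2 = some (inHw hw c)
      · -- merge into the last part / extend the last range
        have hne : st.1 ≠ [] := hcond.1
        obtain ⟨gs0, g, hgseq⟩ : ∃ gs0 g, st.1 = gs0 ++ [g] :=
          ⟨st.1.dropLast, st.1.getLast hne, (List.dropLast_append_getLast hne).symm⟩
        have hsb : sbStep hw st c = (gs0 ++ [g ++ [c]], some (inHw hw c)) := by
          simp only [sbStep, if_pos hcond]
          rw [hgseq]
          simp
        have hmemg : g ∈ st.1 := by rw [hgseq]; exact List.mem_append_right _ (by simp)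
        obtain ⟨hgne, hgconst⟩ := h3.1 g hmemg
        have hcsl : cs.getLast?.map (inHw hw) = some (inHw hw c) := by rw [← h1, hcond.2]
        obtain ⟨c0, hc0l, hc0p⟩ : ∃ c0, cs.getLast? = some c0 ∧ inHw hw c0 = inHw hw c := by
          cases hl : cs.getLast? with
          | none => rw [hl] at hcsl; simp at hcsl
          | some c0 => rw [hl] at hcsl; exact ⟨c0, rfl, by simpa using hcsl⟩
        have hflatg : gs0.flatten ++ g = cs := by
          rw [← h2, hgseq]; simp
        have hc0g : g.getLast? = some c0 := by
          have h' := hc0l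
          rw [← hflatg, List.getLast?_append_of_ne_nil _ hgne] at h'
          exact h'
        have hc0mem : c0 ∈ g := List.mem_of_getLast? hc0g
        have hkg : inHw hw g.headI = inHw hw c := by
          rw [← hc0p]; exact (hgconst c0 hc0mem).symm
        obtain ⟨a, ta, hgat⟩ := List.exists_cons_of_ne_nil hgne
        have hheadI : (g ++ [c]).headI = g.headI := by rw [hgat]; rfl
        rw [hsb]
        refine ⟨rfl, ?_, ⟨?_, ?_⟩, hidx4, hidx5, ?_⟩
        · -- flatten
          simp only [List.flatten_append, List.flatten_cons, List.flatten_nil, List.append_nil]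
          rw [← List.append_assoc, hflatg]
        · -- parts nonempty & key-constant
          intro g' hg'
          rcases List.mem_append.1 hg' with hg0 | hgc
          · exact h3.1 g' (by rw [hgseq]; exact List.mem_append_left _ hg0)
          · have hgc' : g' = g ++ [c] := by simpa using hgc
            subst hgc'
            refine ⟨by simp, ?_⟩
            intro ch hch
            rw [hheadI]
            rcases List.mem_append.1 hch with hch1 | hch2
            · exact hgconst ch hch1
            · have : ch = c := by simpa using hch2
              subst this
              exact hkg.symm
        · -- alternation chain
          have hch0 := h3.2
          rw [hgseq, List.isChain_append] at hch0
          rw [List.isChain_append]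
          obtain ⟨hA, _, hAB⟩ := hch0
          refine ⟨hA, by simp, ?_⟩
          intro x hx y hy
          have hy' : g ++ [c] = y := by simpa using hy
          rw [← hy', hheadI]
          exact hAB x hx g (by simp)
        · -- ranges
          by_cases hpc : inHw hw c = true
          · have hidxl : (idxOf hw cs).getLast? = some ((cs.length : Int) - 1) :=
              h5.2.1 c0 hc0l (hc0p.trans hpc)
            have hidxne : idxOf hw cs ≠ [] := by
              intro hh; rw [hh] at hidxl; simp at hidxl
            rw [if_pos hpc, buildRanges_snoc, if_neg hidxne, if_pos hidxl]
            rw [h6, hgseq, rangesOf_append, rangesOf_append]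
            have hgI : inHw hw g.headI = true := hkg.trans hpc
            have hgI2 : inHw hw (g ++ [c]).headI = true := by rw [hheadI]; exact hgI
            simp only [rangesOf, hgI, hgI2, if_true, List.append_nil]
            rw [List.dropLast_concat, List.getLast?_concat]
            have hb : ((0 + gs0.flatten.length + (g ++ [c]).length : Nat) : Int)
                = ((0 + gs0.flatten.length + g.length : Nat) : Int) + 1 := by
              simp only [List.length_append, List.length_cons, List.length_nil]
              push_cast
              omega
            rw [hb]
          · have hpc' : inHw hw c = false := by simpa using hpc
            rw [if_neg hpc, List.append_nil]
            rw [h6, hgseq, rangesOf_append, rangesOf_append]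
            have hgI : inHw hw g.headI = false := hkg.trans hpc'
            have hgI2 : inHw hw (g ++ [c]).headI = false := by rw [hheadI]; exact hgI
            simp [rangesOf, hgI, hgI2]
      · -- start a new part / append a fresh range
        have hsb : sbStep hw st c = (st.1 ++ [[c]], some (inHw hw c)) := by
          simp only [sbStep, if_neg hcond]
        have hkne : st.1 ≠ [] → st.2 ≠ some (inHw hw c) := by
          intro hne hk; exact hcond ⟨hne, hk⟩
        rw [hsb]
        refine ⟨rfl, ?_, ⟨?_, ?_⟩, hidx4, hidx5, ?_⟩
        · simp [h2]
        · intro g' hg'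
          rcases List.mem_append.1 hg' with hg0 | hgc
          · exact h3.1 g' hg0
          · have : g' = [c] := by simpa using hgc
            subst this
            exact ⟨by simp, by intro ch hch; simp at hch; subst hch; rfl⟩
        · rw [List.isChain_append]
          refine ⟨h3.2, by simp, ?_⟩
          intro x hx y hy
          have hy' : [c] = y := by simpa using hy
          rw [← hy']
          have hxl : st.1.getLast? = some x := hx
          have hxne : st.1 ≠ [] := by intro hh; rw [hh] at hxl; simp at hxl
          have hxmem : x ∈ st.1 := List.mem_of_getLast? hxl
          obtain ⟨hxne', hxconst⟩ := h3.1 x hxmem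
          have hcsl : cs.getLast? = x.getLast? := by
            conv_lhs => rw [← h2]
            rw [← List.dropLast_append_getLast hxne]
            have hgl : st.1.getLast hxne = x := by
              have hh := List.getLast?_eq_some_getLast hxne
              rw [hxl] at hh
              exact (Option.some_injective _ hh.symm)
            rw [hgl]
            simp only [List.flatten_append, List.flatten_cons, List.flatten_nil, List.append_nil]
            exact List.getLast?_append_of_ne_nil _ hxne'
          obtain ⟨cx, hcxg⟩ : ∃ cx, x.getLast? = some cx := by
            cases hxx : x.getLast? with
            | none => exact absurd (List.getLast?_eq_none_iff.1 hxx) hxne'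
            | some cx => exact ⟨cx, rfl⟩
          have hcx : inHw hw cx = inHw hw x.headI := hxconst cx (List.mem_of_getLast? hcxg)
          have hst2 : st.2 = some (inHw hw x.headI) := by
            rw [h1, hcsl, hcxg]
            simp [hcx]
          have hne2 : inHw hw x.headI ≠ inHw hw c := by
            intro hh
            apply hkne hxne
            rw [hst2, hh]
          simpa using hne2
        · by_cases hpc : inHw hw c = true
          · rw [if_pos hpc, buildRanges_snoc]
            have hlen : st.1.flatten.length = cs.length := by rw [h2]
            by_cases hidx : idxOf hw cs = []
            · rw [if_pos hidx]
              have hr0 : rangesOf (inHw hw) 0 st.1 = [] := by rw [← h6, hidx]; rfl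
              rw [rangesOf_append, hr0]
              simp only [List.nil_append, rangesOf, List.headI, hpc, if_true, List.length_cons,
                List.length_nil, List.append_nil, hlen, List.cons.injEq, Prod.mk.injEq, and_true]
              push_cast
              omega
            · rw [if_neg hidx]
              have hnomerge : (idxOf hw cs).getLast? ≠ some ((cs.length : Int) - 1) := by
                obtain ⟨c0, hc0l⟩ : ∃ c0, cs.getLast? = some c0 := by
                  cases hl : cs.getLast? with
                  | none => exact absurd (h5.1 hl) hidx
                  | some c0 => exact ⟨c0, rfl⟩
                have hcsne : cs ≠ [] := by intro hh; rw [hh] at hc0l; simp at hc0l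
                have hstne : st.1 ≠ [] := by
                  intro hh
                  rw [hh] at h2
                  exact hcsne h2.symm
                have hc0false : inHw hw c0 = false := by
                  cases hp0 : inHw hw c0
                  · rfl
                  · exfalso
                    apply hkne hstne
                    rw [h1, hc0l]
                    have hpp : inHw hw c0 = inHw hw c := by rw [hp0, hpc]
                    simp [hpp]
                have hbound : ∀ m ∈ idxOf hw cs, m < (cs.length : Int) - 1 :=
                  h5.2.2 c0 hc0l hc0false
                intro heq
                obtain ⟨x, hxl⟩ : ∃ x, (idxOf hw cs).getLast? = some x := by
                  cases hxx : (idxOf hw cs).getLast? with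
                  | none => exact absurd (List.getLast?_eq_none_iff.1 hxx) hidx
                  | some x => exact ⟨x, rfl⟩
                rw [hxl] at heq
                have hxv : x = (cs.length : Int) - 1 := by simpa using heq
                have hxb := hbound x (List.mem_of_getLast? hxl)
                omega
              rw [if_neg hnomerge, h6, rangesOf_append]
              have hlen : st.1.flatten.length = cs.length := by rw [h2]
              simp only [rangesOf, List.headI, hpc, if_true, List.length_cons, List.length_nil,
                List.append_nil, hlen, List.append_cancel_left_eq, List.cons.injEq,
                Prod.mk.injEq, and_true]
              push_cast
              omega
          · have hpc' : inHw hw c = false := by simpa using hpc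
            rw [if_neg hpc, List.append_nil, h6, rangesOf_append]
            simp [rangesOf, hpc']

lemma flatR_mono (p : Char → Bool) (gs : List (List Char)) : ∀ (pos : Nat), WFRuns p gs →
    (flatR (rangesOf p pos gs)).Pairwise (· < ·) ∧
    ∀ x ∈ flatR (rangesOf p pos gs),
      ((pos : Int) ≤ x ∧ (p gs.headI.headI = false → (pos : Int) < x)) := by
  induction gs with
  | nil => intro pos _; constructor <;> simp [rangesOf, flatR]
  | cons g t ih =>
      intro pos hwf
      obtain ⟨hall, hchain⟩ := hwf
      obtain ⟨hgne, hgconst⟩ := hall g (by simp)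
      have hwft : WFRuns p t := by
        refine ⟨fun g' h' => hall g' (by simp [h']), ?_⟩
        cases t with
        | nil => simp
        | cons g2 t2 => exact (List.isChain_cons_cons.1 hchain).2
      have iht := ih (pos + g.length) hwft
      have hglen : 0 < g.length := List.length_pos_of_ne_nil hgne
      by_cases hk : p g.headI = true
      · have hflat : flatR (rangesOf p pos (g :: t)) =
            (pos : Int) :: ((pos + g.length : Nat) : Int) :: flatR (rangesOf p (pos + g.length) t) := by
          simp [rangesOf, hk, flatR]
        rw [hflat]
        have hrest : ∀ x ∈ flatR (rangesOf p (pos + g.length) t), ((pos + g.length : Nat) : Int) < x := by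
          intro x hx
          cases t with
          | nil => simp [rangesOf, flatR] at hx
          | cons g2 t2 =>
              have hrel := (List.isChain_cons_cons.1 hchain).1
              have hne2 : p g2.headI = false := by
                cases hb : p g2.headI
                · rfl
                · exact absurd (hk.trans hb.symm) hrel
              have hh := (iht.2 x hx).2
              exact hh (by simpa using hne2)
        constructor
        · refine List.pairwise_cons.2 ⟨?_, List.pairwise_cons.2 ⟨?_, iht.1⟩⟩
          · intro y hy
            rcases List.mem_cons.1 hy with rfl | hy2
            · push_cast; omega
            · have h1 := (iht.2 y hy2).1
              push_cast at h1 ⊢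
              omega
          · intro y hy
            exact hrest y hy
        · intro x hx
          rcases List.mem_cons.1 hx with rfl | hx2
          · refine ⟨le_refl _, ?_⟩
            intro hf
            exact absurd (by simpa using hf) (by simp [hk])
          · rcases List.mem_cons.1 hx2 with rfl | hx3
            · constructor
              · push_cast; omega
              · intro _; push_cast; omega
            · have h1 := (iht.2 x hx3).1
              constructor
              · push_cast at h1 ⊢; omega
              · intro _
                have h2 := hrest x hx3
                push_cast at h1 h2 ⊢
                omega
      · have hk' : p g.headI = false := by simpa using hk
        have hflat : flatR (rangesOf p pos (g :: t)) = flatR (rangesOf p (pos + g.length) t) := by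
          simp [rangesOf, hk', flatR]
        rw [hflat]
        refine ⟨iht.1, ?_⟩
        intro x hx
        have h1 := (iht.2 x hx).1
        push_cast at h1
        constructor
        · omega
        · intro _; omega

lemma sorted_set_id (l : List Int) (h : l.Pairwise (· < ·)) :
    PySem.List.sorted (PySem.Set.ofList l) (fun x => x) false = l := by
  have nod : l.Nodup := h.imp (fun hlt => ne_of_lt hlt)
  rw [PySem.Set.ofList_eq_self_of_nodup l nod]
  exact PySem.List.sorted_eq_of_perm_of_pairwise_lt l l _ (List.Perm.refl l) h

lemma split_runs (p : Char → Bool) (gs : List (List Char)) : ∀ (pos : Nat) (text : List Char),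
    WFRuns p gs → text.drop pos = gs.flatten →
    (((((pos : Int) :: flatR (rangesOf p pos gs)).zip
        ((flatR (rangesOf p pos gs)).map some ++ [(none : Option Int)])).map
        (fun ij => PySem.List.slice text (some ij.1) ij.2)).filter
      (fun part => !part.isEmpty)) = gs := by
  induction gs with
  | nil =>
      intro pos text _ htext
      have h0 : flatR (rangesOf p pos ([] : List (List Char))) = [] := rfl
      rw [h0]
      simp [PySem.List.slice_from_natCast, htext]
  | cons g t ih =>
      intro pos text hwf htext
      obtain ⟨hall, hchain⟩ := hwf
      obtain ⟨hgne, hgconst⟩ := hall g (by simp)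
      have hwft : WFRuns p t := by
        refine ⟨fun g' h' => hall g' (by simp [h']), ?_⟩
        cases t with
        | nil => simp
        | cons g2 t2 => exact (List.isChain_cons_cons.1 hchain).2
      have hflatten : text.drop pos = g ++ t.flatten := by simpa using htext
      have hdrop2 : text.drop (pos + g.length) = t.flatten := by
        have h' : (text.drop pos).drop g.length = text.drop (pos + g.length) := by
          rw [List.drop_drop]
        rw [← h', hflatten, List.drop_left]
      have hgE : g.isEmpty = false := by simp [hgne]
      have hsliceg : PySem.List.slice text (some ((pos : Nat) : Int))
          (some ((pos + g.length : Nat) : Int)) = g := by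
        rw [PySem.List.slice_natCast, hflatten]
        have hsub : pos + g.length - pos = g.length := by omega
        rw [hsub]
        exact List.take_left
      have hsnil : ∀ (q : Nat), PySem.List.slice text (some ((q : Nat) : Int))
          (some ((q : Nat) : Int)) = [] := by
        intro q
        rw [PySem.List.slice_natCast]
        simp
      by_cases hk : p g.headI = true
      · have hflat : flatR (rangesOf p pos (g :: t)) =
            (pos : Int) :: ((pos + g.length : Nat) : Int) :: flatR (rangesOf p (pos + g.length) t) := by
          simp [rangesOf, hk, flatR]
        rw [hflat]
        have ih' := ih (pos + g.length) text hwft hdrop2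
        simp only [List.zip_cons_cons, List.map_cons, List.cons_append, List.map_cons,
          List.filter_cons] at ih' ⊢
        rw [hsnil pos, hsliceg]
        simp only [List.isEmpty_nil, Bool.not_true, Bool.false_eq_true, if_false, hgE,
          Bool.not_false, if_true]
        rw [ih']
      · have hk' : p g.headI = false := by simpa using hk
        cases t with
        | nil =>
            have hflat : flatR (rangesOf p pos [g]) = [] := by simp [rangesOf, hk', flatR]
            rw [hflat]
            have hdg : text.drop pos = g := by simpa using hflatten
            simp [PySem.List.slice_from_natCast, hdg, hgE]
        | cons g2 t2 =>
            have hrel := (List.isChain_cons_cons.1 hchain).1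
            have hk2 : p g2.headI = true := by
              cases hb : p g2.headI
              · exact absurd (hk'.trans hb.symm) hrel
              · rfl
            have hflat : flatR (rangesOf p pos (g :: g2 :: t2)) =
                ((pos + g.length : Nat) : Int) :: ((pos + g.length + g2.length : Nat) : Int) ::
                  flatR (rangesOf p (pos + g.length + g2.length) t2) := by
              simp [rangesOf, hk', hk2, flatR, Nat.add_assoc]
        -- note: rangesOf p (pos+g.length) (g2::t2) = (pos+|g|, pos+|g|+|g2|) :: rangesOf ... t2
            have ih' := ih (pos + g.length) text hwft hdrop2
            have hflat2 : flatR (rangesOf p (pos + g.length) (g2 :: t2)) =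
                ((pos + g.length : Nat) : Int) :: ((pos + g.length + g2.length : Nat) : Int) ::
                  flatR (rangesOf p (pos + g.length + g2.length) t2) := by
              simp [rangesOf, hk2, flatR, Nat.add_assoc]
            rw [hflat2] at ih'
            rw [hflat]
            simp only [List.zip_cons_cons, List.map_cons, List.cons_append, List.filter_cons] at ih' ⊢
            rw [hsnil (pos + g.length)] at ih'
            simp only [List.isEmpty_nil, Bool.not_true, Bool.false_eq_true, if_false] at ih'
            rw [hsliceg]
            simp only [hgE, Bool.not_false, if_true]
            rw [ih']

-- ===== VERDICT (by name: the statement is the Claim_ definition above) =====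
theorem split_headwords_spec : Claim_equal_split_headwords := by
  unfold Claim_equal_split_headwords
  intro text hw _
  unfold Spec_split_headwords split_headwords split_headwords_alt split_at_indices
  obtain ⟨h1, h2, h3, h4, h5, h6⟩ := master hw text.toList
  simp only []
  rw [h6]
  have hflat : (rangesOf (inHw hw) 0 (text.toList.foldl (sbStep hw) ([], none)).1).flatMap
      (fun r => [r.1, r.2]) = flatR (rangesOf (inHw hw) 0 (text.toList.foldl (sbStep hw) ([], none)).1) := rfl
  rw [hflat]
  have hmono := flatR_mono (inHw hw) (text.toList.foldl (sbStep hw) ([], none)).1 0 h3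
  rw [sorted_set_id _ hmono.1]
  have hzip := split_runs (inHw hw) (text.toList.foldl (sbStep hw) ([], none)).1 0 text.toList h3
    (by simpa using h2.symm)
  simp only [Nat.cast_zero] at hzip
  rw [hzip]
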